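-- pv_equiv track=rewrite | github.com/jeyserma/cmgtools-lite | WMass/python/plotter/runFakeRate.py | getProcessGroup
-- ===== SOURCE A (Python) =====
-- def getProcessGroup(proc, era):
--     # check whether Wmunu is split by charge or includes both samples, same for Wtaunu
--     if any(x in proc for x in ["Wmunu", "Wtaunu"]) and all(c not in proc for c in ["plus", "minus"]):
--         if era == "all":
--             ret = f"--pg '{proc} := {proc}_plus_preVFP,{proc}_plus_postVFP,{proc}_minus_preVFP,{proc}_minus_postVFP'"
--         else:
--             ret = f"--pg '{proc} := {proc}_plus_{era},{proc}_minus_{era}'"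
--     else:
--         if era == "all":
--             ret = f"--pg '{proc} := {proc}_preVFP,{proc}_postVFP'"
--         else:
--             ret = f"--pg '{proc} := {proc}_{era}'"
--     return ret
-- ===== SOURCE B (Python) =====
-- def getProcessGroup(proc, era):
--     eras = ["preVFP", "postVFP"] if era == "all" else [era]
--     split = any(x in proc for x in ["Wmunu", "Wtaunu"]) and all(c not in proc for c in ["plus", "minus"])
--     charges = ["plus", "minus"] if split else [""]
--     samples = ",".join((f"{proc}_{c}_{e}" if c else f"{proc}_{e}") for c in charges for e in eras)
--     return f"--pg '{proc} := {samples}'"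
-- ===== Notes on version B (the rewrite author's own statement) =====
-- stated objective: simpler
-- what changed: Replaces the four unrolled format-string branches by computing the era list and charge-prefix list, generating the sample names with a nested comprehension and joining them with ','.
import Mathlib
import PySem

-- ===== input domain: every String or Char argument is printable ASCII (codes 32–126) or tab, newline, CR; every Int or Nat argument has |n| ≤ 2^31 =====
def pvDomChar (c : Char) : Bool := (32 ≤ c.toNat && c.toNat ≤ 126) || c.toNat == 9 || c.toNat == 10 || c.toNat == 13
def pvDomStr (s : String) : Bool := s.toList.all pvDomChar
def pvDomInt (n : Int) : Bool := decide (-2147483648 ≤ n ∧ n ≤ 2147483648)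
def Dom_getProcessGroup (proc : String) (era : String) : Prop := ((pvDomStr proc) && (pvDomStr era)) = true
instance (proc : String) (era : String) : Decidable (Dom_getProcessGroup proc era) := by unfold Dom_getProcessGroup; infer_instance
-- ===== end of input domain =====

-- B computes the era and charge-prefix lists and joins the generated sample names, replacing A's four unrolled format strings (simpler decomposition, same cost).
-- ===== PORT A =====
def getProcessGroup (proc : String) (era : String) : String :=
  if (["Wmunu", "Wtaunu"].any fun x => PySem.Str.isIn x proc) &&
     (["plus", "minus"].all fun c => !(PySem.Str.isIn c proc)) then
    if era == "all" then
      "--pg '" ++ proc ++ " := " ++ proc ++ "_plus_preVFP," ++ proc ++ "_plus_postVFP," ++ proc ++ "_minus_preVFP," ++ proc ++ "_minus_postVFP'"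
    else
      "--pg '" ++ proc ++ " := " ++ proc ++ "_plus_" ++ era ++ "," ++ proc ++ "_minus_" ++ era ++ "'"
  else
    if era == "all" then
      "--pg '" ++ proc ++ " := " ++ proc ++ "_preVFP," ++ proc ++ "_postVFP'"
    else
      "--pg '" ++ proc ++ " := " ++ proc ++ "_" ++ era ++ "'"

-- ===== PORT B =====
def getProcessGroup_alt (proc : String) (era : String) : String :=
  let eras := if era == "all" then ["preVFP", "postVFP"] else [era]
  let split := (["Wmunu", "Wtaunu"].any fun x => PySem.Str.isIn x proc) &&
               (["plus", "minus"].all fun c => !(PySem.Str.isIn c proc))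
  let charges := if split then ["plus", "minus"] else [""]
  let samples := PySem.Str.join "," (charges.flatMap fun c => eras.map fun e =>
      if c == "" then proc ++ "_" ++ e else proc ++ "_" ++ c ++ "_" ++ e)
  "--pg '" ++ proc ++ " := " ++ samples ++ "'"

-- ===== PRECONDITION & SPEC =====
def Spec_getProcessGroup (proc : String) (era : String) (out : String) : Prop := out = getProcessGroup_alt proc era
instance (proc : String) (era : String) (out : String) : Decidable (Spec_getProcessGroup proc era out) := by unfold Spec_getProcessGroup; infer_instance

-- ===== CLAIM (what is proved, stated in full; the proofs are below) =====
def Claim_equal_getProcessGroup : Prop := ∀ (proc : String) (era : String), Dom_getProcessGroup proc era → Spec_getProcessGroup proc era (getProcessGroup proc era)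

-- ===== LEMMAS AND PROOFS =====

-- ===== VERDICT (by name: the statement is the Claim_ definition above) =====
theorem getProcessGroup_spec : Claim_equal_getProcessGroup := by
  intro proc era _
  unfold Spec_getProcessGroup getProcessGroup getProcessGroup_alt
  have hext : ∀ s t : String, s.toList = t.toList → s = t := fun s t h => String.toList_injective h
  simp only []
  split_ifs with h1 h2 h2 <;>
    (apply hext;
     simp [beq_iff_eq, PySem.Str.join, List.flatMap, PySem.Chars.join,
       String.toList_append, List.intercalate])
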